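-- pv_equiv track=rewrite | github.com/sm2774us/competitive_programming | Arrays/033_geeksforgeeks_Jumping_Caterpillars/Solution.py | leftover_leaves_1_nested_loops
-- ===== SOURCE A (Python) =====
-- def leftover_leaves_1_nested_loops(num_leaves, caterpillar_jumps):
--     eat_count = 0
--     eaten = False
--     for num_leaf in range(1, num_leaves + 1):
--         for num_jump in caterpillar_jumps:
--             if num_leaf % num_jump == 0:
--                 eaten = True
--                 break
--         if eaten is True:
--             eat_count += 1
--         eaten = False
--     leftover = num_leaves - eat_count
--     return leftover
-- ===== SOURCE B (Python) =====
-- def leftover_leaves_1_nested_loops(num_leaves, caterpillar_jumps):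
--     if num_leaves <= 0:
--         return num_leaves
--     eaten = bytearray(num_leaves + 1)
--     for jump in caterpillar_jumps:
--         step = abs(jump)
--         for multiple in range(step, num_leaves + 1, step):
--             eaten[multiple] = 1
--     return num_leaves - sum(eaten)
-- ===== Notes on version B (the rewrite author's own statement) =====
-- stated objective: faster
-- what changed: Instead of testing every leaf against every jump with an inner break-loop, B sieves: it marks the multiples of each jump directly by stepping through a bytearray and subtracts the count of marks, doing O(n + sum n/|jump|) work instead of O(n*k).
-- outside the precondition, e.g. on leftover_leaves_1_nested_loops(3, [1, 0]): A returns 0, B raises ValueError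
import Mathlib
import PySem

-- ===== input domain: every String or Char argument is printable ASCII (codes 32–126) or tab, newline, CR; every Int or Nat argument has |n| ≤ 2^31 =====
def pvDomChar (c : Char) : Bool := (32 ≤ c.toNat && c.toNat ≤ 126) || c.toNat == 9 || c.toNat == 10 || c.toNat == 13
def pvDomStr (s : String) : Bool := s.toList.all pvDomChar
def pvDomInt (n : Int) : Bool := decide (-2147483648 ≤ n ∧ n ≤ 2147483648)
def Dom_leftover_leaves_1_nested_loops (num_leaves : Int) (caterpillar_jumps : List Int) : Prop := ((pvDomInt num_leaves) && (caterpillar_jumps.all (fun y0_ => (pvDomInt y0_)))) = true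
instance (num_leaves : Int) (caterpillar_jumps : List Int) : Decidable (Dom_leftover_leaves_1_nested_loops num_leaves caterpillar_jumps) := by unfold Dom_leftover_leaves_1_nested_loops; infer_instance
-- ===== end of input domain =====

-- B replaces A's leaf-by-leaf scan with a sieve: it marks the multiples of each jump by
-- stepping through a bytearray and subtracts the count of marks (objective: faster).

-- ===== PORT A =====
-- inner 'for num_jump in caterpillar_jumps: if num_leaf % num_jump == 0: eaten = True; break'
def pvInnerA (num_leaf : Int) : List Int → Bool
  | [] => false
  | num_jump :: rest =>
      if PySem.Int.mod num_leaf num_jump == 0 then true else pvInnerA num_leaf rest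

def leftover_leaves_1_nested_loops (num_leaves : Int) (caterpillar_jumps : List Int) : Int :=
  -- state = (eat_count, eaten); eaten enters each iteration, is possibly set by the inner loop,
  -- and is reset to false at the end of the body
  let st := (PySem.List.pyRange 1 (num_leaves + 1) 1).foldl
    (fun (st : Int × Bool) num_leaf =>
      let eaten := st.2 || pvInnerA num_leaf caterpillar_jumps
      ((if eaten then st.1 + 1 else st.1), false))
    (0, false)
  let leftover := num_leaves - st.1
  leftover

-- ===== PORT B =====
def leftover_leaves_1_nested_loops_alt (num_leaves : Int) (caterpillar_jumps : List Int) : Int :=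
  if num_leaves ≤ 0 then num_leaves
  else
    -- eaten = bytearray(num_leaves + 1): Bools standing for the 0/1 bytes
    let eaten : Array Bool := Array.replicate (num_leaves + 1).toNat false
    -- 'eaten[multiple] = 1': the index is always in range here (1 ≤ multiple ≤ num_leaves),
    -- so setIfInBounds is exact
    let eaten := caterpillar_jumps.foldl
      (fun (eaten : Array Bool) jump =>
        (PySem.List.pyRange |jump| (num_leaves + 1) |jump|).foldl
          (fun (eaten : Array Bool) multiple => eaten.setIfInBounds multiple.toNat true)
          eaten)
      eaten
    -- 'num_leaves - sum(eaten)'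
    num_leaves - eaten.foldl (fun acc b => acc + (if b then 1 else 0)) 0

-- ===== PRECONDITION & SPEC =====
-- Pre_ excludes inputs with a zero jump and at least one leaf: there A either raises
-- ZeroDivisionError or (when an earlier jump already ate every leaf, e.g. (3, [1, 0])) returns
-- only by accident of the break, while B's stepping range raises ValueError on the zero step.
def Pre_leftover_leaves_1_nested_loops (num_leaves : Int) (caterpillar_jumps : List Int) : Prop :=
  num_leaves ≤ 0 ∨ (0 : Int) ∉ caterpillar_jumps
instance (num_leaves : Int) (caterpillar_jumps : List Int) : Decidable (Pre_leftover_leaves_1_nested_loops num_leaves caterpillar_jumps) := by unfold Pre_leftover_leaves_1_nested_loops; infer_instance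

def pvWitness_leftover_leaves_1_nested_loops : Int × List Int := (10, [2, 3, -4])

def Spec_leftover_leaves_1_nested_loops (num_leaves : Int) (caterpillar_jumps : List Int) (out : Int) : Prop := out = leftover_leaves_1_nested_loops_alt num_leaves caterpillar_jumps
instance (num_leaves : Int) (caterpillar_jumps : List Int) (out : Int) : Decidable (Spec_leftover_leaves_1_nested_loops num_leaves caterpillar_jumps out) := by unfold Spec_leftover_leaves_1_nested_loops; infer_instance

-- ===== CLAIM (what is proved, stated in full; the proofs are below) =====
def Claim_equal_leftover_leaves_1_nested_loops : Prop := ∀ (num_leaves : Int) (caterpillar_jumps : List Int), Dom_leftover_leaves_1_nested_loops num_leaves caterpillar_jumps → Pre_leftover_leaves_1_nested_loops num_leaves caterpillar_jumps → Spec_leftover_leaves_1_nested_loops num_leaves caterpillar_jumps (leftover_leaves_1_nested_loops num_leaves caterpillar_jumps)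

-- ===== LEMMAS AND PROOFS =====

-- the inner break-loop of A decides "some jump divides the leaf"
theorem pvInnerA_eq_any (l : Int) (js : List Int) :
    pvInnerA l js = js.any (fun j => decide (j ∣ l)) := by
  induction js with
  | nil => rfl
  | cons j rest ih =>
      simp only [pvInnerA, List.any_cons]
      by_cases h : j ∣ l
      · have : PySem.Int.mod l j = 0 := (PySem.Int.mod_eq_zero_iff_dvd l j).2 h
        simp [this, h]
      · have : PySem.Int.mod l j ≠ 0 := fun hz => h ((PySem.Int.mod_eq_zero_iff_dvd l j).1 hz)
        simp [this, h, ih]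

-- A's outer fold counts the leaves the inner loop accepts
theorem pvFoldA_count (js : List Int) (xs : List Int) (c : Int) :
    xs.foldl
      (fun (st : Int × Bool) l =>
        let eaten := st.2 || pvInnerA l js
        ((if eaten then st.1 + 1 else st.1), false))
      (c, false)
      = (c + (xs.countP (fun l => pvInnerA l js) : Int), false) := by
  induction xs generalizing c with
  | nil => simp
  | cons x rest ih =>
      simp only [List.foldl_cons, List.countP_cons]
      by_cases h : pvInnerA x js = true
      · rw [if_pos (by simp [h])]
        rw [ih (c + 1)]
        simp [h]; ring
      · rw [if_neg (by simp [h])]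
        rw [ih c]
        simp [h]

-- for a nonzero jump, its stepping range is exactly its multiples in [1, n]
theorem pvMemRangeStep (n : Int) (j : Int) (hj : j ≠ 0) (m : Int) :
    m ∈ PySem.List.pyRange |j| (n + 1) |j| ↔ (j ∣ m ∧ 1 ≤ m ∧ m < n + 1) := by
  have hpos : (0 : Int) < |j| := abs_pos.2 hj
  rw [PySem.List.mem_pyRange_iff_of_pos hpos]
  constructor
  · rintro ⟨h1, h2, h3⟩
    have hd : |j| ∣ m := by
      have := dvd_add h3 (dvd_refl |j|)
      simpa using this
    exact ⟨(abs_dvd j m).1 hd, by omega, h2⟩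
  · rintro ⟨hd, h1, h2⟩
    have habs : |j| ∣ m := (abs_dvd j m).2 hd
    exact ⟨Int.le_of_dvd (by omega) habs, h2, dvd_sub habs dvd_rfl⟩

-- the inner marking fold: sets exactly the positions listed (all of them positive and in range)
theorem pvSetFold (L : List Int) (arr : Array Bool)
    (hL : ∀ m ∈ L, 0 < m ∧ m < (arr.size : Int)) :
    (L.foldl (fun (a : Array Bool) m => a.setIfInBounds m.toNat true) arr).size = arr.size ∧
    ∀ i : Nat, (L.foldl (fun (a : Array Bool) m => a.setIfInBounds m.toNat true) arr)[i]?
      = if (i : Int) ∈ L then some true else arr[i]? := by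
  induction L generalizing arr with
  | nil => simp
  | cons m rest ih =>
      have hm := hL m (List.mem_cons_self ..)
      have hrest : ∀ m' ∈ rest, 0 < m' ∧ m' < ((arr.setIfInBounds m.toNat true).size : Int) := by
        intro m' hm'
        rw [Array.size_setIfInBounds]
        exact hL m' (List.mem_cons_of_mem _ hm')
      obtain ⟨hsz, hget⟩ := ih (arr.setIfInBounds m.toNat true) hrest
      rw [List.foldl_cons]
      refine ⟨by rw [hsz, Array.size_setIfInBounds], fun i => ?_⟩
      rw [hget i, Array.getElem?_setIfInBounds]
      by_cases hr : (i : Int) ∈ rest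
      · simp [List.mem_cons, hr]
      · by_cases hi : (i : Int) = m
        · have h1 : m.toNat = i := by omega
          have h2 : m.toNat < arr.size := by omega
          rw [if_neg hr, if_pos h1, if_pos h2, if_pos (List.mem_cons.2 (Or.inl hi))]
        · have h1 : m.toNat ≠ i := by omega
          simp [List.mem_cons, hr, hi, h1]

-- "leaf i is eaten": some jump's stepping range contains i
def pvPred (n : Int) (js : List Int) (i : Nat) : Bool :=
  js.any (fun j => decide ((i : Int) ∈ PySem.List.pyRange |j| (n + 1) |j|))

-- the outer fold over the jumps: a position is marked iff some jump's range contains it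
theorem pvOuterFold (n : Int) (js : List Int) (h0 : (0 : Int) ∉ js) (arr : Array Bool)
    (hsz : (arr.size : Int) = n + 1) :
    (js.foldl
      (fun (eaten : Array Bool) jump =>
        (PySem.List.pyRange |jump| (n + 1) |jump|).foldl
          (fun (eaten : Array Bool) multiple => eaten.setIfInBounds multiple.toNat true)
          eaten)
      arr).size = arr.size ∧
    ∀ i : Nat, (js.foldl
      (fun (eaten : Array Bool) jump =>
        (PySem.List.pyRange |jump| (n + 1) |jump|).foldl
          (fun (eaten : Array Bool) multiple => eaten.setIfInBounds multiple.toNat true)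
          eaten)
      arr)[i]?
      = if pvPred n js i then some true else arr[i]? := by
  induction js generalizing arr with
  | nil => simp [pvPred]
  | cons j rest ih =>
      have hj0 : j ≠ 0 := fun h => h0 (h ▸ List.mem_cons_self ..)
      have hL : ∀ m ∈ PySem.List.pyRange |j| (n + 1) |j|, 0 < m ∧ m < (arr.size : Int) := by
        intro m hm
        obtain ⟨_, h1, h2⟩ := (pvMemRangeStep n j hj0 m).1 hm
        omega
      obtain ⟨hsz1, hget1⟩ := pvSetFold (PySem.List.pyRange |j| (n + 1) |j|) arr hL
      have h0rest : (0 : Int) ∉ rest := fun h => h0 (List.mem_cons_of_mem _ h)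
      obtain ⟨hsz2, hget2⟩ := ih h0rest _ (by rw [hsz1]; exact hsz)
      rw [List.foldl_cons]
      refine ⟨by rw [hsz2, hsz1], fun i => ?_⟩
      rw [hget2 i, hget1 i]
      simp only [pvPred, List.any_cons]
      by_cases hr : pvPred n rest i = true
      · simp only [pvPred] at hr
        simp [hr]
      · simp only [pvPred, Bool.not_eq_true] at hr
        by_cases hj : (i : Int) ∈ PySem.List.pyRange |j| (n + 1) |j|
        · simp [hr, hj]
        · simp [hr, hj]

-- positions outside [1, n] are never eaten
theorem pvPred_false (n : Int) (js : List Int) (h0 : (0 : Int) ∉ js) (i : Nat)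
    (hi : (i : Int) < 1 ∨ n < (i : Int)) : pvPred n js i = false := by
  simp only [pvPred, List.any_eq_false, decide_eq_true_eq]
  intro j hj hmem
  have hj0 : j ≠ 0 := fun h => h0 (h ▸ hj)
  obtain ⟨_, h1, h2⟩ := (pvMemRangeStep n j hj0 (i : Int)).1 hmem
  omega

-- for a leaf 1 + k in range, "eaten" is "some jump divides it"
theorem pvPred_succ (n : Int) (js : List Int) (h0 : (0 : Int) ∉ js) (k : Nat)
    (hk : (k : Int) < n) :
    pvPred n js (k + 1) = js.any (fun j => decide (j ∣ (1 + (k : Int)))) := by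
  induction js with
  | nil => rfl
  | cons j rest ih =>
      have hj0 : j ≠ 0 := fun h => h0 (h ▸ List.mem_cons_self ..)
      have h0rest : (0 : Int) ∉ rest := fun h => h0 (List.mem_cons_of_mem _ h)
      simp only [pvPred, List.any_cons] at ih ⊢
      rw [ih h0rest]
      congr 1
      have hcast : ((k + 1 : Nat) : Int) = 1 + (k : Int) := by push_cast; ring
      rw [hcast]
      by_cases hd : j ∣ 1 + (k : Int)
      · have : (1 + (k : Int)) ∈ PySem.List.pyRange |j| (n + 1) |j| :=
          (pvMemRangeStep n j hj0 _).2 ⟨hd, by omega, by omega⟩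
        simp [this, hd]
      · have : (1 + (k : Int)) ∉ PySem.List.pyRange |j| (n + 1) |j| :=
          fun hm => hd ((pvMemRangeStep n j hj0 _).1 hm).1
        simp [this, hd]

-- summing a list of 0/1 bytes (Bools) is counting the true ones
theorem pvSumBools (l : List Bool) (c : Int) :
    l.foldl (fun acc b => acc + (if b then 1 else 0)) c = c + (l.countP id : Int) := by
  induction l generalizing c with
  | nil => simp
  | cons b rest ih =>
      simp only [List.foldl_cons, List.countP_cons, ih]
      cases b
      · simp
      · simp
        omega

-- ===== VERDICT (by name: the statement is the Claim_ definition above) =====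
theorem leftover_leaves_1_nested_loops_spec : Claim_equal_leftover_leaves_1_nested_loops := by
  intro n js _ hpre
  unfold Spec_leftover_leaves_1_nested_loops
  unfold leftover_leaves_1_nested_loops leftover_leaves_1_nested_loops_alt
  by_cases hn : n ≤ 0
  · rw [PySem.List.pyRange_one_eq_nil (by omega)]
    simp [hn]
  · have h0 : (0 : Int) ∉ js := hpre.resolve_left hn
    rw [if_neg hn]
    simp only []
    rw [pvFoldA_count]
    -- the final sieve array and its characterisation
    obtain ⟨hsz, hget⟩ := pvOuterFold n js h0 (Array.replicate (n + 1).toNat false)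
      (by simp; omega)
    -- the sieve array, as a list, is the table of pvPred over [0, n]
    have htab : (js.foldl
      (fun (eaten : Array Bool) jump =>
        (PySem.List.pyRange |jump| (n + 1) |jump|).foldl
          (fun (eaten : Array Bool) multiple => eaten.setIfInBounds multiple.toNat true)
          eaten)
      (Array.replicate (n + 1).toNat false)).toList
        = (List.range (n + 1).toNat).map (pvPred n js) := by
      apply List.ext_getElem?
      intro i
      rw [Array.getElem?_toList, hget i, List.getElem?_map]
      by_cases hi : i < (n + 1).toNat
      · rw [List.getElem?_range hi]
        by_cases hp : pvPred n js i = true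
        · simp [hp]
        · simp only [Bool.not_eq_true] at hp
          rw [if_neg (by simp [hp]), Array.getElem?_replicate, if_pos hi,
            Option.map_some, hp]
      · have hp : pvPred n js i = false := pvPred_false n js h0 i (by omega)
        rw [if_neg (by simp [hp]), Array.getElem?_replicate, if_neg hi,
          List.getElem?_eq_none (by simpa using Nat.le_of_not_lt hi)]
        rfl
    -- turn B's sum into a count of pvPred over [0, n]
    rw [← Array.foldl_toList, htab, pvSumBools, List.countP_map]
    -- peel index 0 (never eaten) and shift: count of pvPred over [1, n]
    have hsplit : (n + 1).toNat = n.toNat + 1 := by omega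
    rw [hsplit, List.range_succ_eq_map, List.countP_cons, List.countP_map]
    have hp0 : (id ∘ pvPred n js) 0 = false := by
      simp only [Function.comp, id]
      exact pvPred_false n js h0 0 (Or.inl (by omega))
    rw [hp0]
    -- A's count over range(1, n+1) in the same shape
    rw [PySem.List.pyRange_one 1 (n + 1), List.countP_map]
    have hrange : (n + 1 - 1).toNat = n.toNat := by omega
    rw [hrange]
    -- pointwise agreement of the two per-leaf predicates on [0, n)
    have hcongr : List.countP ((fun l => pvInnerA l js) ∘ fun k : Nat => 1 + (k : Int))
        (List.range n.toNat)
        = List.countP ((id ∘ pvPred n js) ∘ Nat.succ) (List.range n.toNat) := by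
      apply List.countP_congr
      intro k hk
      have hkn : k < n.toNat := List.mem_range.1 hk
      simp only [Function.comp, id, Nat.succ_eq_add_one]
      rw [pvInnerA_eq_any, pvPred_succ n js h0 k (by omega)]
    rw [hcongr]
    push_cast
    ring
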